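-- pv_equiv track=rewrite | github.com/TymonKalista/prg-basics | 04-Functions/7-25.py | f
-- ===== SOURCE A (Python) =====
-- def f(x,y):
--     sum_of_everything = 0
--     for i in range(x,y+1):
--         if i%2 == 0 and i%3==0 and i%4 !=0:
--             sum_of_everything = sum_of_everything + i
--         else:
--             sum_of_everything = sum_of_everything
--     return sum_of_everything
-- ===== SOURCE B (Python) =====
-- def f(x, y):
--     # closed form: the qualifying i are exactly i == 6 (mod 12); sum the arithmetic series
--     a = x + (6 - x) % 12          # first term >= x congruent to 6 mod 12
--     if a > y:
--         return 0
--     n = (y - a) // 12 + 1         # number of terms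
--     return n * a + 6 * n * (n - 1)
-- ===== Notes on version B (the rewrite author's own statement) =====
-- stated objective: faster
-- what changed: Replaces the per-integer loop over [x,y] by a closed-form arithmetic-series sum over the terms congruent to 6 mod 12.
import Mathlib
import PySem

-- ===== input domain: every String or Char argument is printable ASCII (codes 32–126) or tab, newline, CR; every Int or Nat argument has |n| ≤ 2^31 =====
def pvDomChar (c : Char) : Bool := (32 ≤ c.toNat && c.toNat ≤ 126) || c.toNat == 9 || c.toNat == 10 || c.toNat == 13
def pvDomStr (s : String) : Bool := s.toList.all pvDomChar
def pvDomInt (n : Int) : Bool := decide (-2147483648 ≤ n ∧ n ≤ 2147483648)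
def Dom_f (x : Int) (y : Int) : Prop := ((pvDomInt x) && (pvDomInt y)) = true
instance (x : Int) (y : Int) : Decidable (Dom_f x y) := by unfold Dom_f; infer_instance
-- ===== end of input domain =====

-- B replaces A's per-integer loop over [x,y] by a closed-form arithmetic-series sum (faster: O(1) vs O(y-x)).


-- ===== PORT A =====
def f (x : Int) (y : Int) : Int :=
  (PySem.List.pyRange x (y + 1) 1).foldl
    (fun sum_of_everything i =>
      if PySem.Int.mod i 2 = 0 ∧ PySem.Int.mod i 3 = 0 ∧ PySem.Int.mod i 4 ≠ 0 then
        sum_of_everything + i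
      else
        sum_of_everything) 0

-- ===== PORT B =====
def f_alt (x : Int) (y : Int) : Int :=
  let a := x + PySem.Int.mod (6 - x) 12
  if a > y then 0
  else
    let n := PySem.Int.floordiv (y - a) 12 + 1
    n * a + 6 * n * (n - 1)

-- ===== PRECONDITION & SPEC =====
def Spec_f (x : Int) (y : Int) (out : Int) : Prop := out = f_alt x y
instance (x : Int) (y : Int) (out : Int) : Decidable (Spec_f x y out) := by unfold Spec_f; infer_instance

-- ===== CLAIM (what is proved, stated in full; the proofs are below) =====
def Claim_equal_f : Prop := ∀ (x : Int) (y : Int), Dom_f x y → Spec_f x y (f x y)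

-- ===== LEMMAS AND PROOFS =====

lemma alt_step (x y : Int) (hxy : x ≤ y) :
    f_alt x y = f_alt x (y - 1) + (if (y - 6) % 12 = 0 then y else 0) := by
  have hm : ∀ a : Int, PySem.Int.mod a 12 = a % 12 := fun a => PySem.Int.mod_eq_emod_of_pos (by norm_num)
  have hf : ∀ a : Int, PySem.Int.floordiv a 12 = a / 12 := fun a => PySem.Int.floordiv_eq_ediv_of_pos (by norm_num)
  unfold f_alt
  dsimp only
  simp only [hm, hf]
  set r : Int := (6 - x) % 12 with hr
  have hr0 : 0 ≤ r ∧ r < 12 := ⟨Int.emod_nonneg _ (by norm_num), Int.emod_lt_of_pos _ (by norm_num)⟩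
  have ha6 : (12 : Int) ∣ (x + r - 6) := by omega
  by_cases hy6 : (y - 6) % 12 = 0
  · -- y ≡ 6 (mod 12): last element of the range qualifies
    have hay : x + r ≤ y := by omega
    by_cases heq : x + r = y
    · simp only [hy6, if_pos]
      rw [if_neg (by omega), if_pos (by omega)]
      have : (y - (x + r)) / 12 = 0 := by omega
      rw [this]; ring_nf; omega
    · have hlt : x + r ≤ y - 12 := by omega
      obtain ⟨m, hm⟩ : ∃ m : Int, y - (x + r) = 12 * m := by
        have : (12 : Int) ∣ (y - (x + r)) := by omega
        exact this
      have hm1 : 1 ≤ m := by omega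
      rw [if_neg (by omega), if_neg (by omega), if_pos hy6]
      have h1 : (y - (x + r)) / 12 = m := by omega
      have h2 : (y - 1 - (x + r)) / 12 = m - 1 := by omega
      rw [h1, h2]
      have hy : y = x + r + 12 * m := by omega
      rw [hy]; ring
  · -- y ≢ 6 (mod 12): the counts agree
    simp only [hy6, if_false, add_zero]
    by_cases hay : x + r > y
    · rw [if_pos hay, if_pos (by omega)]
    · have hne : x + r ≠ y := by omega
      rw [if_neg hay, if_neg (by omega)]
      have : (y - (x + r)) / 12 = (y - 1 - (x + r)) / 12 := by omega
      rw [this]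

lemma loop_step (x y : Int) (hxy : x ≤ y) :
    f x y = f x (y - 1) + (if (y - 6) % 12 = 0 then y else 0) := by
  unfold f
  rw [PySem.List.pyRange_one_succ_right hxy]
  rw [List.foldl_append]
  have hco : (PySem.Int.mod y 2 = 0 ∧ PySem.Int.mod y 3 = 0 ∧ PySem.Int.mod y 4 ≠ 0)
      ↔ (y - 6) % 12 = 0 := by
    rw [PySem.Int.mod_eq_emod_of_pos (by norm_num),
      PySem.Int.mod_eq_emod_of_pos (by norm_num),
      PySem.Int.mod_eq_emod_of_pos (by norm_num)]
    omega
  have : y - 1 + 1 = y := by ring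
  rw [this]
  by_cases h : (y - 6) % 12 = 0
  · rw [if_pos h]
    simp only [List.foldl, if_pos (hco.mpr h)]
  · rw [if_neg h, add_zero]
    simp only [List.foldl, if_neg (fun hc => h (hco.mp hc))]

lemma main_lemma (n : Nat) : ∀ x y : Int, y + 1 - x ≤ n → f x y = f_alt x y := by
  induction n with
  | zero =>
    intro x y h
    have hyx : y < x := by omega
    unfold f f_alt
    rw [PySem.List.pyRange_one_eq_nil (by omega)]
    have hr0 : 0 ≤ PySem.Int.mod (6 - x) 12 := by
      rw [PySem.Int.mod_eq_emod_of_pos (by norm_num)]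
      exact Int.emod_nonneg _ (by norm_num)
    rw [if_pos (by omega)]
    rfl
  | succ n ih =>
    intro x y h
    by_cases hxy : x ≤ y
    · rw [loop_step x y hxy, alt_step x y hxy, ih x (y - 1) (by omega)]
    · unfold f f_alt
      rw [PySem.List.pyRange_one_eq_nil (by omega)]
      have hr0 : 0 ≤ PySem.Int.mod (6 - x) 12 := by
        rw [PySem.Int.mod_eq_emod_of_pos (by norm_num)]
        exact Int.emod_nonneg _ (by norm_num)
      rw [if_pos (by omega)]
      rfl

-- ===== VERDICT (by name: the statement is the Claim_ definition above) =====
theorem f_spec : Claim_equal_f := by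
  intro x y _
  unfold Spec_f
  exact main_lemma (y + 1 - x).toNat x y (Int.self_le_toNat _)
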